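-- pv_equiv track=rewrite | github.com/homebrew9/leetcode_solutions | algorithms/medium/maximum_number_of_matching_indices_after_right_shifts.py | maximumMatchingIndices
-- ===== SOURCE A (Python) =====
-- from typing import List
--
-- def maximumMatchingIndices(nums1: List[int], nums2: List[int]) -> int:
--     def match_count(idx):
--         # Given an index "idx", reset nums2 so that it looks like it is
--         # shifted "idx" times. Then zip and compare matching elements.
--         arr = nums2[idx:] + nums2[:idx]
--         return sum([nums1[i] == arr[i] for i in range(N)])
--     N = len(nums1)
--     res = 0
--     for i in range(N):
--         res = max(res, match_count(i))
--     return res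
-- ===== SOURCE B (Python) =====
-- from typing import List
--
-- def maximumMatchingIndices(nums1: List[int], nums2: List[int]) -> int:
--     # Voting: each equal pair (i, j) with nums1[i] == nums2[j] matches exactly
--     # at the shift (j - i) % len(nums2); tally votes and take the best shift.
--     N = len(nums1)
--     M = len(nums2)
--     pos = {}
--     for j, v in enumerate(nums2):
--         pos.setdefault(v, []).append(j)
--     votes = {}
--     for i, v in enumerate(nums1):
--         for j in pos.get(v, []):
--             s = (j - i) % M
--             votes[s] = votes.get(s, 0) + 1
--     res = 0
--     for idx in range(N):
--         res = max(res, votes.get(idx, 0))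
--     return res
-- ===== Notes on version B (the rewrite author's own statement) =====
-- stated objective: faster
-- what changed: Instead of materializing every rotation of nums2 and rescanning all N indices per shift (O(N*M)), B indexes nums2's positions by value once and lets each equal pair (i,j) vote for its unique shift (j-i)%M, then takes the best vote among shifts 0..N-1 (O(N+M+#equal pairs)).
import Mathlib
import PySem

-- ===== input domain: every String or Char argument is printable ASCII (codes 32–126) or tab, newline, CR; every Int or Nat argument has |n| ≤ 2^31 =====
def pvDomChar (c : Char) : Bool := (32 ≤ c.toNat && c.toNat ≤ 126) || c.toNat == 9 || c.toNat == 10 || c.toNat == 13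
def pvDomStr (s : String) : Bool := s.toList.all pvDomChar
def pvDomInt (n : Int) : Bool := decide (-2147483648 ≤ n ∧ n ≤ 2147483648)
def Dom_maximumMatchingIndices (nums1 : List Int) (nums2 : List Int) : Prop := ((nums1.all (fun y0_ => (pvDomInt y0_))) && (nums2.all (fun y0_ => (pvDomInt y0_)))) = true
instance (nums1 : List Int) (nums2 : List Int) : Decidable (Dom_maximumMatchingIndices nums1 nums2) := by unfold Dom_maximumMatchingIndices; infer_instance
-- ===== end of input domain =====

-- B replaces A's try-every-shift O(N·M) scan with one voting pass: each equal pair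
-- (i, j) votes for the shift (j - i) % M; measured faster on the large inputs.

-- ===== PORT A =====
-- inner helper match_count(idx) of A
def mmiMatchCount (nums1 nums2 : List Int) (N idx : Int) : Int :=
  let arr := PySem.List.slice nums2 (some idx) none ++ PySem.List.slice nums2 none (some idx)
  ((PySem.List.pyRange 0 N 1).map
    (fun i => if PySem.List.pyGet? nums1 i == PySem.List.pyGet? arr i then (1 : Int) else 0)).sum

def maximumMatchingIndices (nums1 : List Int) (nums2 : List Int) : Int :=
  let N : Int := PySem.List.len nums1
  (PySem.List.pyRange 0 N 1).foldl (fun res i => max res (mmiMatchCount nums1 nums2 N i)) 0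

-- ===== PORT B =====
-- pos: value -> list of its indices in nums2 ('pos.setdefault(v, []).append(j)')
def mmiPos (nums2 : List Int) : PySem.Dict Int (List Int) :=
  (PySem.List.enumerate nums2).foldl (fun d p => d.modify p.2 [] (fun l => l ++ [p.1])) PySem.Dict.empty

-- votes: shift -> number of equal pairs matching at that shift
def mmiVotes (nums1 nums2 : List Int) (M : Int) : PySem.Dict Int Int :=
  (PySem.List.enumerate nums1).foldl
    (fun d p => ((mmiPos nums2).getD p.2 []).foldl
      (fun d j => d.modify (PySem.Int.mod (j - p.1) M) 0 (· + 1)) d)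
    PySem.Dict.empty

def maximumMatchingIndices_alt (nums1 : List Int) (nums2 : List Int) : Int :=
  let N : Int := PySem.List.len nums1
  let M : Int := PySem.List.len nums2
  let votes := mmiVotes nums1 nums2 M
  (PySem.List.pyRange 0 N 1).foldl (fun res idx => max res (votes.getD idx 0)) 0

-- ===== PRECONDITION & SPEC =====
-- A raises IndexError (arr[i] out of range) when 0 < len(nums2) < len(nums1); excluded.
def Pre_maximumMatchingIndices (nums1 : List Int) (nums2 : List Int) : Prop :=
  nums1 = [] ∨ nums1.length ≤ nums2.length
instance (nums1 : List Int) (nums2 : List Int) : Decidable (Pre_maximumMatchingIndices nums1 nums2) := by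
  unfold Pre_maximumMatchingIndices; infer_instance
def pvWitness_maximumMatchingIndices : List Int × List Int := ([1, 2], [2, 1])

def Spec_maximumMatchingIndices (nums1 : List Int) (nums2 : List Int) (out : Int) : Prop :=
  out = maximumMatchingIndices_alt nums1 nums2
instance (nums1 : List Int) (nums2 : List Int) (out : Int) : Decidable (Spec_maximumMatchingIndices nums1 nums2 out) := by
  unfold Spec_maximumMatchingIndices; infer_instance

-- ===== CLAIM (what is proved, stated in full; the proofs are below) =====
def Claim_equal_maximumMatchingIndices : Prop := ∀ (nums1 : List Int) (nums2 : List Int), Dom_maximumMatchingIndices nums1 nums2 → Pre_maximumMatchingIndices nums1 nums2 → Spec_maximumMatchingIndices nums1 nums2 (maximumMatchingIndices nums1 nums2)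

-- ===== LEMMAS AND PROOFS =====

-- common specification: matches of nums1 against nums2 rotated left by idx
def mmiSpec (nums1 nums2 : List Int) (idx : Int) : Int :=
  ((PySem.List.pyRange 0 (nums1.length : Int) 1).map
    (fun i => if PySem.List.pyGetD nums1 i 0
                 = PySem.List.pyGetD nums2 ((idx + i) % (nums2.length : Int)) 0
              then (1 : Int) else 0)).sum

-- grouping fold: what pos.getD returns
lemma mmi_group_getD (l : List (Int × Int)) (d : PySem.Dict Int (List Int)) (v : Int) :
    ((l.foldl (fun d p => d.modify p.2 [] (fun s => s ++ [p.1])) d).getD v []) =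
      d.getD v [] ++ (l.filter (fun p => p.2 == v)).map (·.1) := by
  induction l generalizing d with
  | nil => simp
  | cons p t ih =>
      rw [List.foldl_cons, ih, PySem.Dict.getD_modify, List.filter_cons]
      by_cases h : p.2 = v
      · simp [h]
      · simp [h, Ne.symm h]

-- counting fold, inner loop
lemma mmi_count_inner (js : List Int) (k : Int → Int) (d : PySem.Dict Int Int) (s : Int) :
    ((js.foldl (fun d j => d.modify (k j) 0 (· + 1)) d).getD s 0) =
      d.getD s 0 + (js.countP (fun j => k j == s) : Int) := by
  induction js generalizing d with
  | nil => simp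
  | cons j t ih =>
      rw [List.foldl_cons, ih, PySem.Dict.getD_modify, List.countP_cons]
      by_cases h : k j = s
      · simp [h]; ring
      · simp [h, Ne.symm h]

-- counting fold, outer loop
lemma mmi_count_outer (l : List (Int × Int)) (g : Int × Int → List Int)
    (key : Int × Int → Int → Int) (d : PySem.Dict Int Int) (s : Int) :
    ((l.foldl (fun d p => (g p).foldl (fun d j => d.modify (key p j) 0 (· + 1)) d) d).getD s 0) =
      d.getD s 0 + (l.map (fun p => ((g p).countP (fun j => key p j == s) : Int))).sum := by
  induction l generalizing d with
  | nil => simp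
  | cons p t ih => rw [List.foldl_cons, ih, mmi_count_inner]; simp; ring

-- countP of a "pinpoint" predicate on a Nodup list
lemma mmi_countP_nodup (l : List Int) (hl : l.Nodup) (j0 : Int) (q : Int → Bool) :
    l.countP (fun j => (j == j0) && q j) = if j0 ∈ l ∧ q j0 then 1 else 0 := by
  by_cases hq : q j0
  · rw [List.countP_congr (q := (· == j0)) ?_, ← List.count_eq_countP]
    · by_cases hm : j0 ∈ l
      · simp [hm, hq, List.count_eq_one_of_mem hl hm]
      · simp [hm, List.count_eq_zero_of_not_mem hm]
    · intro x _; by_cases hx : x = j0 <;> simp [hx, hq]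
  · rw [List.countP_eq_zero.2 ?_]
    · simp [hq]
    · intro x _; by_cases hx : x = j0 <;> simp [hx, hq]

-- the unique shift a pair (i, j) votes for
lemma mmi_mod_iff {M i j idx : Int} (_hM : 0 < M) (hj0 : 0 ≤ j) (hj : j < M)
    (hidx0 : 0 ≤ idx) (hidx : idx < M) :
    (j - i) % M = idx ↔ j = (idx + i) % M := by
  constructor
  · intro h
    have : (idx + i) % M = (j - i + i) % M := by
      rw [← h, Int.emod_add_emod]
    simpa [Int.emod_eq_of_lt hj0 hj] using this.symm
  · intro h
    subst h
    have h1 : ((idx + i) % M - i) % M = (idx + i - i) % M := by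
      rw [Int.sub_emod, Int.emod_emod_of_dvd _ dvd_rfl, ← Int.sub_emod]
    simp only [add_sub_cancel_right, Int.emod_eq_of_lt hidx0 hidx] at h1
    exact h1

-- B side: the vote tally at shift idx is mmiSpec
lemma mmi_votes_eq_spec (nums1 nums2 : List Int) (idx : Int)
    (hlen : nums1.length ≤ nums2.length) (h0 : 0 ≤ idx) (hN : idx < (nums1.length : Int)) :
    (mmiVotes nums1 nums2 (PySem.List.len nums2)).getD idx 0 = mmiSpec nums1 nums2 idx := by
  have hM : (0 : Int) < (nums2.length : Int) := by
    have : (0:Int) < (nums1.length : Int) := lt_of_le_of_lt h0 hN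
    exact lt_of_lt_of_le this (by exact_mod_cast hlen)
  unfold mmiVotes mmiSpec
  rw [mmi_count_outer (g := fun p => (mmiPos nums2).getD p.2 [])
        (key := fun p j => PySem.Int.mod (j - p.1) (PySem.List.len nums2))]
  rw [PySem.Dict.getD_empty, zero_add]
  rw [PySem.List.enumerate_eq_map_pyRange nums1 0, List.map_map]
  simp only [PySem.List.len_eq]
  refine congrArg List.sum (List.map_congr_left ?_)
  intro i hi
  have hi' := PySem.List.mem_pyRange_one.1 hi
  -- characterize pos.getD
  have hpos : ∀ v : Int, (mmiPos nums2).getD v [] =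
      (PySem.List.pyRange 0 (nums2.length : Int) 1).filter (fun j => PySem.List.pyGetD nums2 j 0 == v) := by
    intro v
    unfold mmiPos
    rw [mmi_group_getD, PySem.Dict.getD_empty, List.nil_append,
        PySem.List.enumerate_eq_map_pyRange nums2 0, List.filter_map, List.map_map]
    simp [Function.comp_def]
  simp only [Function.comp_apply]
  rw [hpos]
  set v := PySem.List.pyGetD nums1 i 0 with hv
  set j0 : Int := (idx + i) % (nums2.length : Int) with hj0def
  have hcount : (List.filter (fun j => PySem.List.pyGetD nums2 j 0 == v)
        (PySem.List.pyRange 0 (nums2.length : Int) 1)).countP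
        (fun j => PySem.Int.mod (j - i) ((nums2.length : Int)) == idx)
      = if j0 ∈ PySem.List.pyRange 0 (nums2.length : Int) 1 ∧ (PySem.List.pyGetD nums2 j0 0 == v) then 1 else 0 := by
    rw [List.countP_filter]
    rw [List.countP_congr (q := fun j => (j == j0) && (PySem.List.pyGetD nums2 j 0 == v)) ?_]
    · exact mmi_countP_nodup _ (PySem.List.nodup_pyRange_one _ _) j0 _
    · intro x hx
      have hx' := PySem.List.mem_pyRange_one.1 hx
      have hiff : ((x - i) % (nums2.length : Int) = idx) ↔ (x = j0) :=
        mmi_mod_iff hM hx'.1 hx'.2 h0 (lt_of_lt_of_le hN (by exact_mod_cast hlen))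
      simp only [PySem.Int.mod_eq_emod_of_pos hM, Bool.and_eq_true, beq_iff_eq]
      rw [hiff]
  rw [hcount]
  have hj0mem : j0 ∈ PySem.List.pyRange 0 (nums2.length : Int) 1 := by
    rw [PySem.List.mem_pyRange_one]
    exact ⟨Int.emod_nonneg _ (by omega), Int.emod_lt_of_pos _ hM⟩
  by_cases hqq : PySem.List.pyGetD nums2 j0 0 = v
  · simp [hj0mem, hqq]
  · simp [hj0mem, hqq, Ne.symm hqq]

-- A side: match_count idx is mmiSpec
lemma mmi_match_eq_spec (nums1 nums2 : List Int) (idx : Int)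
    (hlen : nums1.length ≤ nums2.length) (h0 : 0 ≤ idx) (hN : idx < (nums1.length : Int)) :
    mmiMatchCount nums1 nums2 (PySem.List.len nums1) idx = mmiSpec nums1 nums2 idx := by
  have hM : (0 : Int) < (nums2.length : Int) := by
    have : (0:Int) < (nums1.length : Int) := lt_of_le_of_lt h0 hN
    exact lt_of_lt_of_le this (by exact_mod_cast hlen)
  have hidxM : idx.toNat ≤ nums2.length := by omega
  unfold mmiMatchCount mmiSpec
  simp only [PySem.List.len_eq]
  refine congrArg List.sum (List.map_congr_left ?_)
  intro i hi
  have hi' := PySem.List.mem_pyRange_one.1 hi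
  have hiN : i.toNat < nums1.length := by omega
  have hiM : i.toNat < nums2.length := by omega
  have harr : PySem.List.slice nums2 (some idx) none ++ PySem.List.slice nums2 none (some idx)
      = nums2.rotate idx.toNat := by
    rw [PySem.List.slice_from nums2 h0, PySem.List.slice_to nums2 h0,
        List.rotate_eq_drop_append_take hidxM]
  rw [harr]
  have hlenrot : i.toNat < (nums2.rotate idx.toNat).length := by simpa using hiM
  have h1 : PySem.List.pyGet? nums1 i = some (nums1[i.toNat]'hiN) := by
    conv_lhs => rw [← Int.toNat_of_nonneg hi'.1]
    rw [PySem.List.pyGet?_natCast]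
    exact List.getElem?_eq_getElem hiN
  have h2 : PySem.List.pyGet? (nums2.rotate idx.toNat) i = some ((nums2.rotate idx.toNat)[i.toNat]'hlenrot) := by
    conv_lhs => rw [← Int.toNat_of_nonneg hi'.1]
    rw [PySem.List.pyGet?_natCast]
    exact List.getElem?_eq_getElem hlenrot
  rw [h1, h2, List.getElem_rotate]
  have h3 : PySem.List.pyGetD nums1 i 0 = nums1[i.toNat] :=
    PySem.List.pyGetD_eq_getElem nums1 0 hi'.1 (by omega)
  have hj0 : (0:Int) ≤ (idx + i) % (nums2.length : Int) := Int.emod_nonneg _ (by omega)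
  have hj1 : (idx + i) % (nums2.length : Int) < (nums2.length : Int) := Int.emod_lt_of_pos _ hM
  have h4 : PySem.List.pyGetD nums2 ((idx + i) % (nums2.length : Int)) 0
      = nums2[((idx + i) % (nums2.length : Int)).toNat]'(by omega) :=
    PySem.List.pyGetD_eq_getElem nums2 0 hj0 (by omega)
  have hkey : (((i.toNat + idx.toNat) % nums2.length : Nat) : Int) = (idx + i) % (nums2.length : Int) := by
    push_cast [Int.toNat_of_nonneg hi'.1, Int.toNat_of_nonneg h0]
    rw [Int.add_comm]
  have h5 : ((idx + i) % (nums2.length : Int)).toNat = (i.toNat + idx.toNat) % nums2.length := by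
    rw [← hkey]; omega
  rw [h3, h4]
  simp only [h5]
  simp

-- ===== VERDICT (by name: the statement is the Claim_ definition above) =====
theorem maximumMatchingIndices_spec : Claim_equal_maximumMatchingIndices := by
  intro nums1 nums2 _ hpre
  unfold Spec_maximumMatchingIndices maximumMatchingIndices maximumMatchingIndices_alt
  refine (PySem.List.foldl_congr_mem _ _ _ _ ?_).symm
  intro acc idx hidx
  have h := PySem.List.mem_pyRange_one.1 hidx
  simp only [PySem.List.len_eq] at h
  have hlen : nums1.length ≤ nums2.length := by
    rcases hpre with h1 | h1
    · subst h1; simp at h; omega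
    · exact h1
  rw [mmi_votes_eq_spec nums1 nums2 idx hlen h.1 h.2,
      mmi_match_eq_spec nums1 nums2 idx hlen h.1 h.2]
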